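-- pv_equiv track=rewrite | github.com/joojeehwan/algo_jjh | test_im/baekjoon/2635.py | make_lst
-- ===== SOURCE A (Python) =====
-- def make_lst(start_num, second_num):
--
--     ans = [start_num, second_num]
--     i = 0
--     while True:
--         ans.append(ans[i] - ans[i + 1])
--         if ans[i + 2] < 0:
--             break
--         i += 1
--     ans.pop(-1)
--
--     return ans
-- ===== SOURCE B (Python) =====
-- def make_lst(start_num, second_num):
--     def tail(a, b):
--         c = a - b
--         if c < 0:
--             return []
--         return [c] + tail(b, c)
--     return [start_num, second_num] + tail(start_num, second_num)
-- ===== Notes on version B (the rewrite author's own statement) =====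
-- stated objective: simpler
-- what changed: Replaces A's index-into-growing-list loop with append-then-pop by a recursive generator that conses each term onto the recursively built tail, never materialising the failing negative term and never popping.
import Mathlib
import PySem

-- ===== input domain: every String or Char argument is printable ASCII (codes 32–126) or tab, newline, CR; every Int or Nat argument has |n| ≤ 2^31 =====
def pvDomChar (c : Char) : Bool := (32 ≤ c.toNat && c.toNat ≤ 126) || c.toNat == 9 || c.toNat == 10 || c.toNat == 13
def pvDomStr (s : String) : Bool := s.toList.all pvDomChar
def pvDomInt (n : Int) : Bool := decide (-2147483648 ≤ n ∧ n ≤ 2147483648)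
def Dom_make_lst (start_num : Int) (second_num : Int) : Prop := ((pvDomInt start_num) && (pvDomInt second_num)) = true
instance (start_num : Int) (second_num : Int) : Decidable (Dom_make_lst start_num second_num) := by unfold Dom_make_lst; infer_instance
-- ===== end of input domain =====

-- B changes A's index-into-growing-list loop (append the term, test it, pop it on break)
-- into a recursive cons-based generator that never adds the failing term: simpler decomposition.

-- ===== PORT A =====
-- A's while-loop over the growing list `ans` with index i; fuel only guards Lean
-- totality: both Pythons diverge at (0,0) (the only non-terminating input, where
-- both fueled ports also agree) and need < 100 steps elsewhere inside Dom. Indices i, i+1, i+2 are always in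
-- range, so `ans[i]` is ported as `List.getD _ _ 0` (exact here); `ans.pop(-1)`
-- after the break is `dropLast`.
def make_lst_loop (fuel : Nat) (ans : List Int) (i : Nat) : List Int :=
  match fuel with
  | 0 => ans
  | fuel + 1 =>
    let ans2 := ans ++ [ans.getD i 0 - ans.getD (i + 1) 0]
    if ans2.getD (i + 2) 0 < 0 then ans2.dropLast
    else make_lst_loop fuel ans2 (i + 1)

def make_lst (start_num : Int) (second_num : Int) : List Int :=
  make_lst_loop 1000000 [start_num, second_num] 0

-- ===== PORT B =====
-- B's recursive helper `tail`: cons each non-negative difference onto the tail.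
def make_lst_tail (fuel : Nat) (a : Int) (b : Int) : List Int :=
  match fuel with
  | 0 => []
  | fuel + 1 =>
    let c := a - b
    if c < 0 then [] else c :: make_lst_tail fuel b c

def make_lst_alt (start_num : Int) (second_num : Int) : List Int :=
  start_num :: second_num :: make_lst_tail 1000000 start_num second_num

-- ===== PRECONDITION & SPEC =====
def Spec_make_lst (start_num : Int) (second_num : Int) (out : List Int) : Prop := out = make_lst_alt start_num second_num
instance (start_num : Int) (second_num : Int) (out : List Int) : Decidable (Spec_make_lst start_num second_num out) := by unfold Spec_make_lst; infer_instance

-- ===== CLAIM (what is proved, stated in full; the proofs are below) =====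
def Claim_equal_make_lst : Prop := ∀ (start_num : Int) (second_num : Int), Dom_make_lst start_num second_num → Spec_make_lst start_num second_num (make_lst start_num second_num)

-- ===== LEMMAS AND PROOFS =====

theorem getD_append2_fst (p : List Int) (a b : Int) :
    (p ++ [a, b]).getD p.length 0 = a := by
  simp [List.getD]

theorem getD_append2_snd (p : List Int) (a b : Int) :
    (p ++ [a, b]).getD (p.length + 1) 0 = b := by
  simp [List.getD]

theorem getD_append3_thd (p : List Int) (a b c : Int) :
    (p ++ [a, b, c]).getD (p.length + 2) 0 = c := by
  simp [List.getD]

-- loop invariant: A's list is a prefix p followed by the two rolling terms a, b,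
-- with i = p.length; then A's remaining loop returns p ++ [a, b] ++ B's tail.
theorem loop_eq_tail (fuel : Nat) (p : List Int) (a b : Int) :
    make_lst_loop fuel (p ++ [a, b]) p.length =
      p ++ [a, b] ++ make_lst_tail fuel a b := by
  induction fuel generalizing p a b with
  | zero => simp [make_lst_loop, make_lst_tail]
  | succ fuel ih =>
    have h1 := getD_append2_fst p a b
    have h2 := getD_append2_snd p a b
    have h3 := getD_append3_thd p a b (a - b)
    have hlist : p ++ [a, b] ++ [a - b] = p ++ [a, b, a - b] := by simp
    by_cases hc : a - b < 0
    · simp only [make_lst_loop, make_lst_tail, h1, h2, hlist, h3, if_pos hc]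
      have : p ++ [a, b, a - b] = (p ++ [a, b]) ++ [a - b] := by simp
      rw [this, List.dropLast_concat]
      simp
    · simp only [make_lst_loop, make_lst_tail, h1, h2, hlist, h3, if_neg hc]
      have hstate : p ++ [a, b, a - b] = (p ++ [a]) ++ [b, a - b] := by simp
      have hlen : p.length + 1 = (p ++ [a]).length := by simp
      rw [hstate, hlen, ih (p ++ [a]) b (a - b)]
      simp

-- ===== VERDICT (by name: the statement is the Claim_ definition above) =====
theorem make_lst_spec : Claim_equal_make_lst := by
  intro s t _
  unfold Spec_make_lst make_lst make_lst_alt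
  have h := loop_eq_tail 1000000 [] s t
  simpa using h
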